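-- pv_equiv track=rewrite | github.com/RaggedR/rsk-transformer | rsk.py | is_rpp
-- ===== SOURCE A (Python) =====
-- Filling = list[list[int]]
--
-- def is_rpp(T: Filling) -> bool:
--     """Check if T is a valid reverse plane partition (weakly increasing rows and columns)."""
--     if not T:
--         return True
--     shape = [len(row) for row in T]
--     for i in range(len(shape) - 1):
--         if shape[i] < shape[i + 1]:
--             return False
--     for row in T:
--         for i in range(len(row) - 1):
--             if row[i] > row[i + 1]:
--                 return False
--     for c in range(shape[0]):
--         for r in range(len(T) - 1):
--             if c < shape[r] and c < shape[r + 1]: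
--                 if T[r][c] > T[r + 1][c]:
--                     return False
--     return True
-- ===== SOURCE B (Python) =====
-- Filling = list[list[int]]
--
-- def is_rpp(T: Filling) -> bool:
--     """Check if T is a valid reverse plane partition (weakly increasing rows and columns)."""
--     prev = None
--     for row in T:
--         if prev is not None and len(prev) < len(row):
--             return False
--         last = None
--         for i, x in enumerate(row):
--             if last is not None and x < last:
--                 return False
--             if prev is not None and i < len(prev) and x < prev[i]:
--                 return False
--             last = x
--         prev = row
--     return True
-- ===== Notes on version B (the rewrite author's own statement) =====
-- stated objective: alternative
-- what changed: B replaces A's three staged whole-table scans (shape pass, row pass, then a guarded column-major double loop) with one fused streaming pass over the rows that carries only the previous row and the last cell, comparing each cell once to its left and upper neighbours as it is read.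
import Mathlib
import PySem

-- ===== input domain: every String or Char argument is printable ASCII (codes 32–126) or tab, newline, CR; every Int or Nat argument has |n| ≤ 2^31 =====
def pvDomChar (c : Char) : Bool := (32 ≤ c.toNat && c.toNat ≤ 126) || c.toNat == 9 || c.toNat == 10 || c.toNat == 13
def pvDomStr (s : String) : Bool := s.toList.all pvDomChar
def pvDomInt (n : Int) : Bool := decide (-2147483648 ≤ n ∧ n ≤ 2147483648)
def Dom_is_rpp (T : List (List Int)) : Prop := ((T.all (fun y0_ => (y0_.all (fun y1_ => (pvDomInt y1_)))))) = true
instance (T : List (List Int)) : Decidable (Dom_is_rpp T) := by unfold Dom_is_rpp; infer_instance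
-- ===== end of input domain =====

-- B is an alternative decomposition: one fused streaming pass over the rows carrying the
-- previous row and the last cell, instead of A's three staged whole-table scans; values are equal.

-- ===== PORT A =====
def is_rpp (T : List (List Int)) : Bool :=
  if T.isEmpty then true
  else
    let shape := T.map List.length
    if (List.range (shape.length - 1)).any (fun i =>
        decide (shape.getD i 0 < shape.getD (i+1) 0)) then false
    else if T.any (fun row => (List.range (row.length - 1)).any (fun i =>
        decide (row.getD (i+1) 0 < row.getD i 0))) then false
    else if (List.range (shape.getD 0 0)).any (fun c =>
        (List.range (T.length - 1)).any (fun r =>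
          decide (c < shape.getD r 0) && decide (c < shape.getD (r+1) 0) &&
          decide ((T.getD (r+1) []).getD c 0 < (T.getD r []).getD c 0))) then false
    else true

-- ===== PORT B =====
-- inner loop of Source B: walk one row, `last` = previous cell, `i` = current index, `prev` = row above
def pvRowScan (prev : Option (List Int)) (last : Option Int) (i : Nat) : List Int → Bool
  | [] => true
  | x :: rest =>
    if (match last with | some l => decide (x < l) | none => false) then false
    else if (match prev with
             | some p => decide (i < p.length) && decide (x < p.getD i 0)
             | none => false) then false
    else pvRowScan prev (some x) (i+1) rest

-- outer loop of Source B: walk the rows, `prev` = previous row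
def pvScan (prev : Option (List Int)) : List (List Int) → Bool
  | [] => true
  | row :: rest =>
    if (match prev with | some p => decide (p.length < row.length) | none => false) then false
    else if pvRowScan prev none 0 row = false then false
    else pvScan (some row) rest

def is_rpp_alt (T : List (List Int)) : Bool := pvScan none T

-- ===== PRECONDITION & SPEC =====
def Spec_is_rpp (T : List (List Int)) (out : Bool) : Prop := out = is_rpp_alt T
instance (T : List (List Int)) (out : Bool) : Decidable (Spec_is_rpp T out) := by unfold Spec_is_rpp; infer_instance

-- ===== CLAIM (what is proved, stated in full; the proofs are below) =====
def Claim_equal_is_rpp : Prop := ∀ (T : List (List Int)), Dom_is_rpp T → Spec_is_rpp T (is_rpp T)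

-- ===== LEMMAS AND PROOFS =====

-- a weakly-increasing test on adjacent pairs, the common reference of both proofs
def pvRowW (row : List Int) : Bool := (row.zip row.tail).all (fun q => decide (q.1 ≤ q.2))

def pvStep (last : Option Int) (row : List Int) : Bool :=
  match last, row with
  | some l, x :: _ => decide (l ≤ x)
  | _, _ => true

theorem pvRowW_cons (x : Int) (rest : List Int) :
    pvRowW (x :: rest) = (pvStep (some x) rest && pvRowW rest) := by
  cases rest <;> simp [pvRowW, pvStep]

-- an any over indices of adjacent pairs equals an any over zip with the tail
theorem pv_range_adj_any {α : Type} (d : α) (R : α → α → Bool) :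
    ∀ (xs : List α),
      (List.range (xs.length - 1)).any (fun i => R (xs.getD i d) (xs.getD (i+1) d))
        = (xs.zip xs.tail).any (fun p => R p.1 p.2)
  | [] => by simp
  | [a] => by simp
  | a :: b :: u => by
    have ih := pv_range_adj_any d R (b :: u)
    simp only [List.length_cons, Nat.add_sub_cancel, List.range_succ_eq_map,
      List.any_cons, List.any_map, Function.comp_def, List.getD_cons_zero,
      List.getD_cons_succ] at *
    rw [ih]
    simp [List.zip]

theorem pv_any_not_all (l : List (Int × Int)) :
    l.any (fun p => decide (p.2 < p.1)) = !(l.all (fun p => decide (p.1 ≤ p.2))) := by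
  induction l with
  | nil => simp
  | cons a t ih => simp [ih, ← decide_not]

theorem pv_any_not_all_nat (l : List (Nat × Nat)) :
    l.any (fun p => decide (p.1 < p.2)) = !(l.all (fun p => decide (p.2 ≤ p.1))) := by
  induction l with
  | nil => simp
  | cons a t ih => simp [ih, ← decide_not]

theorem pv_any_not {α : Type} (p : α → Bool) (l : List α) :
    l.any (fun x => !p x) = !(l.all p) := by
  induction l with
  | nil => simp
  | cons a t ih => simp [ih]

theorem pv_any_congr {α : Type} {f g : α → Bool} (l : List α)
    (h : ∀ x ∈ l, f x = g x) : l.any f = l.any g := by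
  induction l with
  | nil => simp
  | cons a t ih =>
    simp only [List.any_cons, h a (by simp)]
    rw [ih (fun x hx => h x (List.mem_cons_of_mem _ hx))]

theorem pv_getD_map_len : ∀ (T : List (List Int)) (r : Nat), r < T.length →
    (T.map List.length).getD r 0 = (T.getD r []).length
  | a :: t, 0, _ => rfl
  | a :: t, r+1, h => by
    simpa using pv_getD_map_len t r (by simpa using h)

-- the shape-pair check over map length equals the length-pair check over the rows
theorem pv_shape_zip : ∀ (T : List (List Int)),
    ((T.map List.length).zip (T.map List.length).tail).all (fun p => decide (p.2 ≤ p.1))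
      = (T.zip T.tail).all (fun p => decide (p.2.length ≤ p.1.length))
  | [] => rfl
  | [a] => rfl
  | a :: b :: u => by
    have ih := pv_shape_zip (b :: u)
    simp only [List.map_cons, List.tail_cons, List.zip_cons_cons, List.all_cons] at *
    rw [ih]

-- adjacent rows all at least as long as the next: heads bound all later lengths
theorem pv_all_le (c : Nat) : ∀ (b : List Int) (L : List (List Int)),
    ((b :: L).zip L).all (fun p => decide (p.2.length ≤ p.1.length)) = true →
    b.length ≤ c → ∀ x ∈ b :: L, x.length ≤ c
  | b, [], _, hb => by simpa using hb
  | b, a :: u, h, hb => by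
    simp only [List.zip_cons_cons, List.all_cons, Bool.and_eq_true, decide_eq_true_eq] at h
    intro x hx
    rcases List.mem_cons.mp hx with rfl | hx
    · exact hb
    · exact pv_all_le c a u h.2 (le_trans h.1 hb) x hx

-- element-wise reading of the zip-all test
theorem pv_zip_all_iff (a b : List Int) :
    ((a.zip b).all (fun v => decide (v.1 ≤ v.2)) = true)
      ↔ ∀ c, c < a.length → c < b.length → a.getD c 0 ≤ b.getD c 0 := by
  rw [List.all_eq_true]
  constructor
  · intro h c h1 h2
    rw [List.getD_eq_getElem _ _ h1, List.getD_eq_getElem _ _ h2]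
    have hc : c < (a.zip b).length := by simp [List.length_zip]; omega
    have h' := h ((a.zip b)[c]) (List.getElem_mem hc)
    rw [List.getElem_zip] at h'
    simpa using h'
  · intro h v hv
    obtain ⟨i, hi, hv⟩ := List.mem_iff_getElem.mp hv
    have h1 : i < a.length := by simp [List.length_zip] at hi; omega
    have h2 : i < b.length := by simp [List.length_zip] at hi; omega
    have h' := h i h1 h2
    rw [List.getD_eq_getElem _ _ h1, List.getD_eq_getElem _ _ h2] at h'
    rw [← hv, List.getElem_zip]
    simpa using h'

-- B's inner loop computes: head bounded by `last`, row weakly increasing, row dominated by prev from i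
theorem pv_rowScan_eq (prev : Option (List Int)) :
    ∀ (row : List Int) (last : Option Int) (i : Nat),
      pvRowScan prev last i row
        = (pvStep last row && pvRowW row &&
            (match prev with
             | none => true
             | some p => ((p.drop i).zip row).all (fun q => decide (q.1 ≤ q.2))))
  | [], last, i => by cases prev <;> cases last <;> simp [pvRowScan, pvStep, pvRowW]
  | x :: rest, last, i => by
    have ih := pv_rowScan_eq prev rest (some x) (i+1)
    simp only [pvRowScan]
    rw [ih, pvRowW_cons]
    cases prev with
    | none =>
      cases last with
      | none => simp [pvStep]
      | some l =>
        by_cases hlx : x < l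
        · simp [pvStep, hlx, show ¬ l ≤ x by omega]
        · simp [pvStep, hlx, show l ≤ x by omega]
    | some p =>
      simp only []
      by_cases hip : i < p.length
      · rw [List.drop_eq_getElem_cons hip]
        rw [show p.getD i 0 = p[i] from List.getD_eq_getElem _ _ hip]
        simp only [List.zip_cons_cons, List.all_cons, hip, decide_true, Bool.true_and]
        by_cases hpx : x < p[i]
        · cases last with
          | none => simp [pvStep, hpx, show ¬ p[i] ≤ x by omega]
          | some l =>
            by_cases hlx : x < l
            · simp [pvStep, hlx, show ¬ p[i] ≤ x by omega]
            · simp [pvStep, hlx, show ¬ p[i] ≤ x by omega, show l ≤ x by omega]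
        · cases last with
          | none =>
            simp [pvStep, hpx, show p[i] ≤ x by omega, Bool.and_assoc]
          | some l =>
            by_cases hlx : x < l
            · simp [pvStep, hlx, show ¬ l ≤ x by omega]
            · simp [pvStep, hlx, hpx, show p[i] ≤ x by omega, show l ≤ x by omega,
                Bool.and_assoc]
      · have h1 : p.drop i = [] := List.drop_eq_nil_of_le (by omega)
        have h2 : p.drop (i+1) = [] := List.drop_eq_nil_of_le (by omega)
        rw [h1, h2]
        simp only [List.zip_nil_left, List.all_nil, Bool.and_true, hip, decide_false,
          Bool.false_and]
        cases last with
        | none => simp [pvStep]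
        | some l =>
          by_cases hlx : x < l
          · simp [pvStep, hlx, show ¬ l ≤ x by omega]
          · simp [pvStep, hlx, show l ≤ x by omega]

-- B's outer loop, started after row p: all later adjacent pairs fit and all later rows are weak
theorem pv_scan_some : ∀ (L : List (List Int)) (p : List Int),
    pvScan (some p) L = true
      ↔ ((∀ q ∈ (p :: L).zip L, q.2.length ≤ q.1.length ∧
            (q.1.zip q.2).all (fun v => decide (v.1 ≤ v.2)) = true)
          ∧ ∀ row ∈ L, pvRowW row = true)
  | [], p => by simp [pvScan]
  | row :: rest, p => by
    have ih := pv_scan_some rest row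
    simp only [pvScan]
    rw [pv_rowScan_eq]
    simp only [List.drop_zero, pvStep, Bool.true_and]
    rw [show (p :: row :: rest).zip (row :: rest) = (p, row) :: ((row :: rest).zip rest) from rfl]
    by_cases hlen : p.length < row.length
    · simp only [hlen, decide_true, if_true]
      constructor
      · intro h; exact absurd h (by simp)
      · rintro ⟨hq, _⟩
        have := (hq (p, row) (by simp)).1
        simp at this; omega
    · simp only [hlen, decide_false, Bool.false_eq_true, if_false]
      by_cases hw : pvRowW row = true
      · by_cases hz : ((p.zip row).all (fun v => decide (v.1 ≤ v.2))) = true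
        · rw [hw, hz]
          simp only [Bool.and_self, Bool.true_eq_false, if_false]
          rw [ih]
          constructor
          · rintro ⟨hq, hr⟩
            refine ⟨?_, ?_⟩
            · rintro q hqmem
              rcases List.mem_cons.mp hqmem with rfl | hqmem
              · exact ⟨Nat.le_of_not_lt hlen, hz⟩
              · exact hq q hqmem
            · intro r hr'
              rcases List.mem_cons.mp hr' with rfl | hr'
              · exact hw
              · exact hr r hr'
          · rintro ⟨hq, hr⟩
            exact ⟨fun q hqmem => hq q (List.mem_cons_of_mem _ hqmem),
                   fun r hr' => hr r (List.mem_cons_of_mem _ hr')⟩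
        · rw [Bool.not_eq_true] at hz
          rw [hz]
          simp only [Bool.and_false, if_true]
          constructor
          · intro h; exact absurd h (by simp)
          · rintro ⟨hq, _⟩
            have := (hq (p, row) (by simp)).2
            simp [hz] at this
      · rw [Bool.not_eq_true] at hw
        rw [hw]
        simp only [Bool.false_and, if_true]
        constructor
        · intro h; exact absurd h (by simp)
        · rintro ⟨_, hr⟩
          have := hr row (by simp)
          simp [hw] at this

-- B's whole value: every adjacent pair fits and dominates, every row is weakly increasing
theorem pv_alt_iff : ∀ (T : List (List Int)),
    is_rpp_alt T = true
      ↔ ((∀ q ∈ T.zip T.tail, q.2.length ≤ q.1.length ∧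
            (q.1.zip q.2).all (fun v => decide (v.1 ≤ v.2)) = true)
          ∧ ∀ row ∈ T, pvRowW row = true)
  | [] => by simp [is_rpp_alt, pvScan]
  | r :: L => by
    rw [is_rpp_alt]
    simp only [pvScan]
    rw [pv_rowScan_eq]
    simp only [pvStep, Bool.true_and, Bool.and_true, List.tail_cons]
    by_cases hw : pvRowW r = true
    · rw [hw]
      simp only [Bool.true_eq_false, Bool.false_eq_true, if_false]
      rw [pv_scan_some]
      constructor
      · rintro ⟨hq, hr⟩
        refine ⟨hq, fun row hrow => ?_⟩
        rcases List.mem_cons.mp hrow with rfl | hrow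
        · exact hw
        · exact hr row hrow
      · rintro ⟨hq, hr⟩
        exact ⟨hq, fun row hrow => hr row (List.mem_cons_of_mem _ hrow)⟩
    · rw [Bool.not_eq_true] at hw
      rw [hw]
      simp only [if_true]
      constructor
      · intro h; exact absurd h (by simp)
      · rintro ⟨_, hr⟩
        have := hr r (by simp)
        simp [hw] at this

-- the crux: under a partition shape, A's guarded column-major scan finds no violation exactly
-- when every adjacent pair passes the zip-domination test
theorem pv_col_bridge (t0 : List Int) (ts : List (List Int))
    (hsh : ((t0 :: ts).zip ts).all (fun p => decide (p.2.length ≤ p.1.length)) = true) :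
    ((List.range t0.length).any (fun c =>
        ((t0 :: ts).zip ts).any (fun q =>
          decide (c < q.1.length) && decide (c < q.2.length) &&
          decide (q.2.getD c 0 < q.1.getD c 0))) = false)
      ↔ ∀ q ∈ (t0 :: ts).zip ts,
          (q.1.zip q.2).all (fun v => decide (v.1 ≤ v.2)) = true := by
  have hbound : ∀ x ∈ t0 :: ts, x.length ≤ t0.length :=
    pv_all_le t0.length t0 ts hsh (le_refl _)
  rw [List.any_eq_false]
  constructor
  · rintro h ⟨q1, q2⟩ hq
    rw [pv_zip_all_iff]
    intro c h1 h2
    have hct0 : c < t0.length := lt_of_lt_of_le h1 (hbound q1 (List.of_mem_zip hq).1)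
    have h' := h c (List.mem_range.mpr hct0)
    rw [Bool.not_eq_true, List.any_eq_false] at h'
    have := h' (q1, q2) hq
    rw [show decide (c < q1.length) = true from by simp [h1],
        show decide (c < q2.length) = true from by simp [h2],
        Bool.true_and, Bool.true_and] at this
    simp only [decide_eq_true_eq] at this
    dsimp only
    omega
  · intro h c _
    rintro hbad
    rw [List.any_eq_true] at hbad
    obtain ⟨⟨q1, q2⟩, hq, hbad⟩ := hbad
    have hz := (pv_zip_all_iff q1 q2).mp (h (q1, q2) hq)
    simp only [Bool.and_eq_true, decide_eq_true_eq] at hbad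
    obtain ⟨⟨h1, h2⟩, h3⟩ := hbad
    have := hz c h1 h2
    omega

-- ===== VERDICT (by name: the statement is the Claim_ definition above) =====
theorem is_rpp_spec : Claim_equal_is_rpp := by
  intro T _
  unfold Spec_is_rpp
  cases T with
  | nil => rfl
  | cons t0 ts =>
    rw [is_rpp]
    simp only [List.isEmpty_cons, Bool.false_eq_true, if_false]
    -- shape check of A as a zip-all over the rows
    have hshape : (List.range (((t0 :: ts).map List.length).length - 1)).any (fun i =>
        decide (((t0 :: ts).map List.length).getD i 0 < ((t0 :: ts).map List.length).getD (i+1) 0))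
        = !(((t0 :: ts).zip ts).all (fun p => decide (p.2.length ≤ p.1.length))) := by
      rw [pv_range_adj_any 0 (fun x y => decide (x < y)), pv_any_not_all_nat, pv_shape_zip]
      rfl
    rw [hshape]
    -- row check of A as an all of pvRowW
    have hrowf : (fun row : List Int => (List.range (row.length - 1)).any (fun i =>
        decide (row.getD (i+1) 0 < row.getD i 0))) = fun row => !pvRowW row := by
      funext row
      rw [pv_range_adj_any (0 : Int) (fun x y => decide (y < x)), pv_any_not_all]
      rfl
    rw [hrowf, pv_any_not pvRowW]
    cases hsh : ((t0 :: ts).zip ts).all (fun p => decide (p.2.length ≤ p.1.length)) with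
    | false =>
      -- some adjacent pair is too long: B is false too
      simp only [Bool.not_false, if_true]
      cases hB : is_rpp_alt (t0 :: ts) with
      | false => rfl
      | true =>
        obtain ⟨hq, _⟩ := (pv_alt_iff (t0 :: ts)).mp hB
        rw [List.all_eq_false] at hsh
        obtain ⟨q, hqmem, hqbad⟩ := hsh
        have := (hq q (by simpa using hqmem)).1
        simp [this] at hqbad
    | true =>
      simp only [Bool.not_true, Bool.false_eq_true, if_false]
      cases hrows : (t0 :: ts).all pvRowW with
      | false =>
        simp only [Bool.not_false, if_true]
        cases hB : is_rpp_alt (t0 :: ts) with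
        | false => rfl
        | true =>
          obtain ⟨_, hr⟩ := (pv_alt_iff (t0 :: ts)).mp hB
          rw [List.all_eq_false] at hrows
          obtain ⟨row, hrmem, hrbad⟩ := hrows
          simp [hr row hrmem] at hrbad
      | true =>
        simp only [Bool.not_true, Bool.false_eq_true, if_false]
        -- normalize A's column scan into zip-tail form
        have hcol : (fun c : Nat => (List.range ((t0 :: ts).length - 1)).any (fun r =>
            decide (c < ((t0 :: ts).map List.length).getD r 0) &&
            decide (c < ((t0 :: ts).map List.length).getD (r+1) 0) &&
            decide (((t0 :: ts).getD (r+1) []).getD c 0 < ((t0 :: ts).getD r []).getD c 0)))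
            = fun c => ((t0 :: ts).zip ts).any (fun q =>
                decide (c < q.1.length) && decide (c < q.2.length) &&
                decide (q.2.getD c 0 < q.1.getD c 0)) := by
          funext c
          have h1 : ∀ r ∈ List.range ((t0 :: ts).length - 1),
              (decide (c < ((t0 :: ts).map List.length).getD r 0) &&
               decide (c < ((t0 :: ts).map List.length).getD (r+1) 0) &&
               decide (((t0 :: ts).getD (r+1) []).getD c 0 < ((t0 :: ts).getD r []).getD c 0))
              = (decide (c < ((t0 :: ts).getD r []).length) &&
                 decide (c < ((t0 :: ts).getD (r+1) []).length) &&
                 decide (((t0 :: ts).getD (r+1) []).getD c 0 < ((t0 :: ts).getD r []).getD c 0)) := by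
            intro r hr
            simp only [List.mem_range, List.length_cons] at hr
            rw [pv_getD_map_len (t0 :: ts) r (by simp; omega),
                pv_getD_map_len (t0 :: ts) (r+1) (by simp; omega)]
          rw [pv_any_congr _ h1,
            pv_range_adj_any ([] : List Int)
              (fun r1 r2 => decide (c < r1.length) && decide (c < r2.length) &&
                decide (r2.getD c 0 < r1.getD c 0)) (t0 :: ts)]
          rfl
        rw [hcol]
        have hsh' := hsh
        rw [show ((t0 :: ts).map List.length).getD 0 0 = t0.length from rfl]
        cases hA : (List.range t0.length).any (fun c =>
            ((t0 :: ts).zip ts).any (fun q =>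
              decide (c < q.1.length) && decide (c < q.2.length) &&
              decide (q.2.getD c 0 < q.1.getD c 0))) with
        | true =>
          -- A found a column violation: B must be false
          simp only [if_true]
          cases hB : is_rpp_alt (t0 :: ts) with
          | false => rfl
          | true =>
            obtain ⟨hq, _⟩ := (pv_alt_iff (t0 :: ts)).mp hB
            have hz : ∀ q ∈ (t0 :: ts).zip ts,
                (q.1.zip q.2).all (fun v => decide (v.1 ≤ v.2)) = true :=
              fun q hq' => (hq q (by simpa using hq')).2
            rw [(pv_col_bridge t0 ts hsh).mpr hz] at hA
            exact absurd hA (by simp)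
        | false =>
          -- no violation anywhere: B is true
          simp only [Bool.false_eq_true, if_false]
          have hz := (pv_col_bridge t0 ts hsh).mp hA
          have hlen : ∀ q ∈ (t0 :: ts).zip ts, q.2.length ≤ q.1.length ∧
              (q.1.zip q.2).all (fun v => decide (v.1 ≤ v.2)) = true := by
            intro q hq
            refine ⟨?_, hz q hq⟩
            rw [List.all_eq_true] at hsh'
            simpa using hsh' q hq
          have hr : ∀ row ∈ t0 :: ts, pvRowW row = true := by
            rw [List.all_eq_true] at hrows
            exact hrows
          exact ((pv_alt_iff (t0 :: ts)).mpr ⟨by simpa using hlen, hr⟩).symm
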